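-- pv_equiv track=rewrite | github.com/jacklionheart/codeflow | loopflow/prompt.py | _parse_context_files
-- ===== SOURCE A (Python) =====
-- from typing import List, Optional, Dict
--
-- def _parse_context_files(content: str) -> Optional[List[str]]:
--     """Parse context files section."""
--     if not content:
--         return None
--     # First split by newlines to get separate lines
--     lines = content.split('\n')
--     # Then split each line by commas and flatten
--     files = []
--     for line in lines:
--         files.extend(f.strip() for f in line.split(',') if f.strip())
--     return files
-- ===== SOURCE B (Python) =====
-- def _parse_context_files(content):
--     """Single-pass character scan: flush the current token at each delimiter."""
--     if not content:
--         return None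
--     files = []
--     cur = []
--     for ch in content:
--         if ch == ',' or ch == '\n':
--             tok = ''.join(cur).strip()
--             if tok:
--                 files.append(tok)
--             cur = []
--         else:
--             cur.append(ch)
--     tok = ''.join(cur).strip()
--     if tok:
--         files.append(tok)
--     return files
-- ===== Notes on version B (the rewrite author's own statement) =====
-- stated objective: alternative
-- what changed: Replaced the nested split-lines-then-split-commas-and-flatten structure by a single left-to-right character scan that accumulates the current token and flushes it (stripped, if non-empty) at each comma or newline.
import Mathlib
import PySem

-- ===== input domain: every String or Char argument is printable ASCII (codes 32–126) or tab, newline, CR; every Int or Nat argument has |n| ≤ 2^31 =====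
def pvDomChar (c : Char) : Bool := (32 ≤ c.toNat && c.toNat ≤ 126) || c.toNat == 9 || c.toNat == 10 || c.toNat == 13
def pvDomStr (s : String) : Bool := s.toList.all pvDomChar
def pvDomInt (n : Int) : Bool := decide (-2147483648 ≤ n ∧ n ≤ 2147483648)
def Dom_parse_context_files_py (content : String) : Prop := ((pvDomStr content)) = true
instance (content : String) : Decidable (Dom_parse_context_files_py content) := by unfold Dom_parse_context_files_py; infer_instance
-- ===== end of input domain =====

-- B replaces A's split-lines-then-split-commas-and-flatten structure by a single
-- left-to-right character scan that flushes the current token at each comma or newline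
-- (objective: alternative decomposition, same cost).

-- ===== PORT A =====
-- the fragment filter of A's generator expression: strip each fragment, keep it iff non-empty
def pvEmit (f : List Char) : Option String :=
  if (PySem.Chars.strip f).isEmpty then none else some (String.ofList (PySem.Chars.strip f))

-- literal transliteration of _parse_context_files: split by '\n', split each line
-- by ',', extend files with the stripped non-empty fragments.
def parse_context_files_py (content : String) : Option (List String) :=
  if content = "" then none
  else some ((PySem.Chars.splitOn content.toList ['\n']).foldl (fun files line =>
    files ++ (PySem.Chars.splitOn line [',']).filterMap pvEmit) [])

-- ===== PORT B =====
-- one iteration of Source B's loop: flush the stripped token at a delimiter, else grow cur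
def pvStep (st : List String × List Char) (ch : Char) : List String × List Char :=
  if ch = ',' ∨ ch = '\n' then
    (if (PySem.Chars.strip st.2).isEmpty then st.1 else st.1 ++ [String.ofList (PySem.Chars.strip st.2)], [])
  else (st.1, st.2 ++ [ch])

-- Source B's final flush after the loop
def pvFlush (st : List String × List Char) : List String :=
  if (PySem.Chars.strip st.2).isEmpty then st.1 else st.1 ++ [String.ofList (PySem.Chars.strip st.2)]

-- transliteration of Source B: a single fold over the characters, then the final flush
def parse_context_files_py_alt (content : String) : Option (List String) :=
  if content = "" then none
  else some (pvFlush (content.toList.foldl pvStep ([], [])))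

-- ===== PRECONDITION & SPEC =====
def Spec_parse_context_files_py (content : String) (out : Option (List String)) : Prop := out = parse_context_files_py_alt content
instance (content : String) (out : Option (List String)) : Decidable (Spec_parse_context_files_py content out) := by unfold Spec_parse_context_files_py; infer_instance

-- ===== CLAIM (what is proved, stated in full; the proofs are below) =====
def Claim_equal_parse_context_files_py : Prop := ∀ (content : String), Dom_parse_context_files_py content → Spec_parse_context_files_py content (parse_context_files_py content)

-- ===== LEMMAS AND PROOFS =====

-- splitting on a list of delimiter characters, accumulating the current piece
def pvSA (ds : List Char) (cur : List Char) : List Char → List (List Char)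
  | [] => [cur]
  | ch :: rest => if ch ∈ ds then cur :: pvSA ds [] rest else pvSA ds (cur ++ [ch]) rest

theorem pvSA_ne_nil (ds cur : List Char) (l : List Char) : pvSA ds cur l ≠ [] := by
  induction l generalizing cur with
  | nil => simp [pvSA]
  | cons x r ih => by_cases h : x ∈ ds <;> simp [pvSA, h, ih]

theorem pv_concat_last {α : Type} (X : List α) (d : α) (h : X ≠ []) :
    X.dropLast ++ [X.getLast?.getD d] = X := by
  rw [List.getLast?_eq_some_getLast h, Option.getD_some]
  exact List.dropLast_append_getLast h

theorem pv_end {α : Type} (A : List α) (d : α) (Z : List α) (hA : A ≠ []) :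
    A ++ Z = A.dropLast ++ (A.getLast?.getD d) :: Z := by
  conv_lhs => rw [← pv_concat_last A d hA]
  simp

theorem pv_last?_cons {α : Type} (a : α) (l : List α) (h : l ≠ []) :
    (a :: l).getLast? = l.getLast? := by
  cases l with
  | nil => exact absurd rfl h
  | cons b m => exact List.getLast?_cons_cons

theorem pv_last_snoc {α : Type} (l : List α) (a d : α) : ((l ++ [a]).getLast?).getD d = a := by
  simp

theorem pvSA_snoc (ds : List Char) (x : Char) (l : List Char) : ∀ cur,
    pvSA ds cur (l ++ [x]) =
      if x ∈ ds then pvSA ds cur l ++ [[]]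
      else (pvSA ds cur l).dropLast ++ [((pvSA ds cur l).getLast?.getD []) ++ [x]] := by
  induction l with
  | nil =>
    intro cur
    by_cases h : x ∈ ds <;> simp [pvSA, h]
  | cons y r ih =>
    intro cur
    by_cases hy : y ∈ ds
    · have hne := pvSA_ne_nil ds ([] : List Char) r
      by_cases h : x ∈ ds
      · simp [pvSA, hy, h, ih]
      · simp [pvSA, hy, h, ih, List.dropLast_cons_of_ne_nil hne, pv_last?_cons _ _ hne]
    · simp [pvSA, hy, ih]

theorem pvSA_snoc_mem (ds : List Char) (x : Char) (l cur : List Char) (h : x ∈ ds) :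
    pvSA ds cur (l ++ [x]) = pvSA ds cur l ++ [[]] := by
  rw [pvSA_snoc, if_pos h]

theorem pvSA_snoc_not (ds : List Char) (x : Char) (l cur : List Char) (h : x ∉ ds) :
    pvSA ds cur (l ++ [x]) =
      (pvSA ds cur l).dropLast ++ [((pvSA ds cur l).getLast?.getD []) ++ [x]] := by
  rw [pvSA_snoc, if_neg h]

-- characterisation of PySem.Chars.splitOn for a single-character separator
theorem pv_go_char (c : Char) : ∀ (fuel : Nat) (l cur : List Char) (acc : List (List Char)),
    l.length < fuel →
    PySem.Chars.splitOn.go [c] fuel l cur acc = acc.reverse ++ pvSA [c] cur.reverse l := by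
  intro fuel
  induction fuel with
  | zero => intro l cur acc h; omega
  | succ n ih =>
    intro l cur acc h
    cases l with
    | nil => simp [PySem.Chars.splitOn.go, pvSA]
    | cons x rest =>
      rw [PySem.Chars.splitOn.go]
      by_cases hx : x = c
      · subst hx
        rw [if_pos (by simp [List.isPrefixOf])]
        rw [ih _ _ _ (by simp at h ⊢; omega)]
        simp [pvSA]
      · rw [if_neg (by simp [List.isPrefixOf]; exact fun hh => hx hh.symm)]
        rw [ih _ _ _ (by simp at h ⊢; omega)]
        simp [pvSA, hx]

theorem pv_splitOn_char (s : List Char) (c : Char) :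
    PySem.Chars.splitOn s [c] = pvSA [c] [] s := by
  rw [PySem.Chars.splitOn, pv_go_char c (s.length + 1) s [] [] (by omega)]
  simp

-- split by '\n', then by ',' inside each line, and flatten = split by both at once
theorem pv_nested (s : List Char) : ∀ cur,
    (pvSA ['\n'] cur s).flatMap (fun line => pvSA [','] [] line) =
      (pvSA [','] [] cur).dropLast ++
        pvSA [',', '\n'] ((pvSA [','] [] cur).getLast?.getD []) s := by
  induction s with
  | nil =>
    intro cur
    show (pvSA ['\n'] cur []).flatMap _ = _
    simp only [pvSA, List.flatMap_cons, List.flatMap_nil, List.append_nil]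
    exact (pv_concat_last _ _ (pvSA_ne_nil [','] [] cur)).symm
  | cons ch r ih =>
    intro cur
    by_cases hn : ch = '\n'
    · subst hn
      rw [show pvSA ['\n'] cur ('\n' :: r) = cur :: pvSA ['\n'] [] r from by simp [pvSA]]
      rw [List.flatMap_cons, ih ([] : List Char)]
      rw [show pvSA [',', '\n'] ((pvSA [','] [] cur).getLast?.getD []) ('\n' :: r) =
        (pvSA [','] [] cur).getLast?.getD [] :: pvSA [',', '\n'] [] r from by simp [pvSA]]
      rw [show (pvSA [','] ([] : List Char) []).dropLast = [] from by simp [pvSA]]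
      rw [show ((pvSA [','] ([] : List Char) []).getLast?.getD []) = [] from by simp [pvSA]]
      rw [List.nil_append]
      exact pv_end _ _ _ (pvSA_ne_nil _ _ _)
    · by_cases hc : ch = ','
      · subst hc
        rw [show pvSA ['\n'] cur (',' :: r) = pvSA ['\n'] (cur ++ [',']) r from by simp [pvSA]]
        rw [ih (cur ++ [','])]
        rw [pvSA_snoc_mem [','] ',' cur [] (by simp)]
        rw [List.dropLast_concat, pv_last_snoc]
        rw [show pvSA [',', '\n'] ((pvSA [','] [] cur).getLast?.getD []) (',' :: r) =
          (pvSA [','] [] cur).getLast?.getD [] :: pvSA [',', '\n'] [] r from by simp [pvSA]]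
        exact pv_end _ _ _ (pvSA_ne_nil _ _ _)
      · rw [show pvSA ['\n'] cur (ch :: r) = pvSA ['\n'] (cur ++ [ch]) r from by simp [pvSA, hn]]
        rw [ih (cur ++ [ch])]
        rw [pvSA_snoc_not [','] ch cur [] (by simpa using hc)]
        rw [List.dropLast_concat, pv_last_snoc]
        rw [show pvSA [',', '\n'] ((pvSA [','] [] cur).getLast?.getD []) (ch :: r) =
          pvSA [',', '\n'] ((pvSA [','] [] cur).getLast?.getD [] ++ [ch]) r from by
            simp [pvSA, hn, hc]]

theorem pv_nested_nil (s : List Char) :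
    (pvSA ['\n'] [] s).flatMap (fun line => pvSA [','] [] line) = pvSA [',', '\n'] [] s := by
  rw [pv_nested s []]
  rfl

-- B's fold, flushed at the end, filters-and-strips the combined split
theorem pv_bfold (l : List Char) : ∀ (files : List String) (cur : List Char),
    pvFlush (l.foldl pvStep (files, cur)) =
      files ++ (pvSA [',', '\n'] cur l).filterMap pvEmit := by
  induction l with
  | nil =>
    intro files cur
    show pvFlush (files, cur) = _
    simp only [pvSA, List.filterMap_cons, List.filterMap_nil, pvEmit, pvFlush]
    by_cases h : (PySem.Chars.strip cur).isEmpty <;> simp [h]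
  | cons ch r ih =>
    intro files cur
    rw [List.foldl_cons]
    by_cases hd : ch = ',' ∨ ch = '\n'
    · have hmem : ch ∈ [',', '\n'] := by rcases hd with h | h <;> simp [h]
      rw [show pvStep (files, cur) ch =
        (if (PySem.Chars.strip cur).isEmpty then files
          else files ++ [String.ofList (PySem.Chars.strip cur)], []) from by
        simp [pvStep, hd]]
      rw [ih]
      rw [show pvSA [',', '\n'] cur (ch :: r) = cur :: pvSA [',', '\n'] [] r from by
        simp [pvSA, hmem]]
      rw [List.filterMap_cons]
      unfold pvEmit
      by_cases h : (PySem.Chars.strip cur).isEmpty <;> simp [h]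
    · have hmem : ch ∉ [',', '\n'] := by simpa using hd
      rw [show pvStep (files, cur) ch = (files, cur ++ [ch]) from by simp [pvStep, hd]]
      rw [ih]
      rw [show pvSA [',', '\n'] cur (ch :: r) = pvSA [',', '\n'] (cur ++ [ch]) r from by
        simp only [pvSA, if_neg hmem]]

-- ===== VERDICT (by name: the statement is the Claim_ definition above) =====
theorem parse_context_files_py_spec : Claim_equal_parse_context_files_py := by
  intro content _hdom
  unfold Spec_parse_context_files_py parse_context_files_py parse_context_files_py_alt
  by_cases h : content = ""
  · rw [if_pos h, if_pos h]
  · rw [if_neg h, if_neg h]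
    rw [pv_bfold content.toList [] []]
    rw [PySem.List.foldl_append_eq_flatMap]
    rw [List.nil_append, List.nil_append, pv_splitOn_char]
    rw [show (fun line => (PySem.Chars.splitOn line [',']).filterMap pvEmit) =
      (fun line => (pvSA [','] [] line).filterMap pvEmit) from
      funext fun line => by rw [pv_splitOn_char]]
    rw [← List.filterMap_flatMap, pv_nested_nil]
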